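-- pv_equiv track=rewrite | github.com/klimereo/RSRL | rsrl.py | is_transitive
-- ===== SOURCE A (Python) =====
-- def is_transitive(R):
--     if not R:
--         return True
--
--     tup = {}
--     for a, b in R:
--         tup.setdefault(a, set()).add(b)
--
--     for a, all_b_in_aRb in tup.items():
--         for b in all_b_in_aRb:
--             if b in tup and a != b:
--                 all_c_in_bRc = tup[b]
--                 if not all(c in all_b_in_aRb for c in all_c_in_bRc):
--                     return False
--
--     return True
-- ===== SOURCE B (Python) =====
-- def is_transitive(R):
--     S = set(R)
--     for a, b in R:
--         for c, d in R:
--             if b == c and (a, d) not in S: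
--                 return False
--     return True
-- ===== Notes on version B (the rewrite author's own statement) =====
-- stated objective: simpler
-- what changed: Replaces A's adjacency-dict (setdefault/add grouping, then an items/values pass with an a!=b skip) by the definitional check: one set of edges and a nested scan over all edge pairs testing every length-2 path directly.
import Mathlib
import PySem

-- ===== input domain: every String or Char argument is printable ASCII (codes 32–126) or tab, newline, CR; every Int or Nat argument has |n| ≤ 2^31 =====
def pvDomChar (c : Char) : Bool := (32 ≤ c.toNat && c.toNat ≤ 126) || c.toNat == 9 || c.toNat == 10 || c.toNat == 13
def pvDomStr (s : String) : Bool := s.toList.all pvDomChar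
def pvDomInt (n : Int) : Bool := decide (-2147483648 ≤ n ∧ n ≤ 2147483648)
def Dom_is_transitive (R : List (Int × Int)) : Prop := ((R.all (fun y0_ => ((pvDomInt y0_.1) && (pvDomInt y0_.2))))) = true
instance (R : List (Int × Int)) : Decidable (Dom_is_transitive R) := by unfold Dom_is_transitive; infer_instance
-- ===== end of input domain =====

-- B replaces A's adjacency-dict grouping pass by the definitional nested scan over all
-- edge pairs with one edge set for membership (objective: simpler); same return value.

-- ===== PORT A =====
-- tup.setdefault(a, set()).add(b)  =  tup[a] = tup.get(a, set()) ∪ {b}  = Dict.modify a ∅ (add · b)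
-- the early 'return False' is ported as .all (the boolean result is the same)
def is_transitive (R : List (Int × Int)) : Bool :=
  if R.isEmpty then true
  else
    let tup : PySem.Dict Int (PySem.Set Int) :=
      R.foldl (fun d p => d.modify p.1 PySem.Set.empty (fun s => PySem.Set.add s p.2)) PySem.Dict.empty
    tup.items.all (fun it =>
      it.2.all (fun b =>
        if tup.contains b && !(it.1 == b) then
          (tup.getD b PySem.Set.empty).all (fun c => PySem.Set.contains it.2 c)
        else true))

-- ===== PORT B =====
def is_transitive_alt (R : List (Int × Int)) : Bool :=
  let S := PySem.Set.ofList R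
  R.all (fun p => R.all (fun q => !(p.2 == q.1 && !(PySem.Set.contains S (p.1, q.2)))))

-- ===== PRECONDITION & SPEC =====
def Spec_is_transitive (R : List (Int × Int)) (out : Bool) : Prop := out = is_transitive_alt R
instance (R : List (Int × Int)) (out : Bool) : Decidable (Spec_is_transitive R out) := by unfold Spec_is_transitive; infer_instance

-- ===== CLAIM (what is proved, stated in full; the proofs are below) =====
def Claim_equal_is_transitive : Prop := ∀ (R : List (Int × Int)), Dom_is_transitive R → Spec_is_transitive R (is_transitive R)

-- ===== LEMMAS AND PROOFS =====

-- mathematical transitivity of the edge list, the common meaning of both programs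
def TransRel (R : List (Int × Int)) : Prop :=
  ∀ a b c : Int, (a, b) ∈ R → (b, c) ∈ R → (a, c) ∈ R

theorem alt_iff (R : List (Int × Int)) : is_transitive_alt R = true ↔ TransRel R := by
  simp only [is_transitive_alt, TransRel, List.all_eq_true, Bool.not_eq_eq_eq_not,
    Bool.not_true, Bool.and_eq_false_iff, PySem.Set.contains_eq_listContains]
  constructor
  · intro h a b c hab hbc
    rcases h (a, b) hab (b, c) hbc with h' | h'
    · simp at h'
    · simpa [PySem.Set.mem_ofList] using h'
  · intro h p hp q hq
    by_cases hbc : p.2 = q.1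
    · right
      simp only [List.contains_eq_mem, PySem.Set.mem_ofList, Bool.not_false, decide_eq_true_eq]
      exact h p.1 p.2 q.2 (by simpa using hp) (by rw [hbc]; simpa using hq)
    · left; simpa using hbc

-- the grouping fold of A
def tupOf (R : List (Int × Int)) : PySem.Dict Int (PySem.Set Int) :=
  R.foldl (fun d p => d.modify p.1 PySem.Set.empty (fun s => PySem.Set.add s p.2)) PySem.Dict.empty

theorem mem_getD_fold (l : List (Int × Int)) (d : PySem.Dict Int (PySem.Set Int)) (a x : Int) :
    x ∈ (l.foldl (fun d p => d.modify p.1 PySem.Set.empty (fun s => PySem.Set.add s p.2)) d).getD a PySem.Set.empty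
      ↔ x ∈ d.getD a PySem.Set.empty ∨ (a, x) ∈ l := by
  induction l generalizing d with
  | nil => simp
  | cons p l ih =>
    simp only [List.foldl_cons, ih, List.mem_cons]
    by_cases hk : a = p.1
    · subst hk
      rw [PySem.Dict.getD_modify_self]
      simp only [PySem.Set.mem_add]
      constructor
      · rintro ((h | h) | h)
        · exact Or.inl h
        · exact Or.inr (Or.inl (by simp [h]))
        · exact Or.inr (Or.inr h)
      · rintro (h | h | h)
        · exact Or.inl (Or.inl h)
        · exact Or.inl (Or.inr (by simpa using congrArg Prod.snd h))
        · exact Or.inr h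
    · rw [PySem.Dict.getD_modify_of_ne _ _ _ hk]
      constructor
      · rintro (h | h)
        · exact Or.inl h
        · exact Or.inr (Or.inr h)
      · rintro (h | h | h)
        · exact Or.inl h
        · exact absurd (congrArg Prod.fst h) (by simpa using hk)
        · exact Or.inr h

theorem mem_getD_tupOf (R : List (Int × Int)) (a x : Int) :
    x ∈ (tupOf R).getD a PySem.Set.empty ↔ (a, x) ∈ R := by
  rw [tupOf, mem_getD_fold]; simp [PySem.Dict.empty, PySem.Dict.getD, PySem.Dict.get?, PySem.Set.empty]

theorem keys_tupOf (R : List (Int × Int)) :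
    (tupOf R).keys = PySem.Set.ofList (R.map Prod.fst) := by
  rw [tupOf, PySem.Dict.keys_foldl_modify_key]
  simp [PySem.Dict.empty, PySem.Dict.keys, PySem.Set.update_nil_left]

theorem mem_keys_tupOf (R : List (Int × Int)) (a : Int) :
    a ∈ (tupOf R).keys ↔ ∃ b, (a, b) ∈ R := by
  rw [keys_tupOf]
  simp only [PySem.Set.mem_ofList, List.mem_map, Prod.exists]
  constructor
  · rintro ⟨x, y, hm, rfl⟩; exact ⟨y, hm⟩
  · rintro ⟨b, hb⟩; exact ⟨a, b, hb, rfl⟩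

theorem nodup_keys_tupOf (R : List (Int × Int)) : (tupOf R).keys.Nodup := by
  rw [keys_tupOf]; exact PySem.Set.nodup_ofList _

theorem a_iff (R : List (Int × Int)) : is_transitive R = true ↔ TransRel R := by
  by_cases hR : R.isEmpty
  · rw [List.isEmpty_iff] at hR
    subst hR
    simp [is_transitive, TransRel]
  · have hstep : is_transitive R =
        (tupOf R).items.all (fun it =>
          it.2.all (fun b =>
            if (tupOf R).contains b && !(it.1 == b) then
              ((tupOf R).getD b PySem.Set.empty).all (fun c => PySem.Set.contains it.2 c)
            else true)) := by
      rw [is_transitive, if_neg hR]; rfl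
    rw [hstep, PySem.Dict.items_eq_map_keys _ (nodup_keys_tupOf R) PySem.Set.empty,
      List.all_map]
    rw [List.all_eq_true]
    constructor
    · intro h a b c hab hbc
      by_cases hab' : a = b
      · subst hab'; exact hbc
      · have h1 := h a ((mem_keys_tupOf R a).2 ⟨b, hab⟩)
        simp only [Function.comp] at h1
        rw [List.all_eq_true] at h1
        have h2 := h1 b ((mem_getD_tupOf R a b).2 hab)
        rw [if_pos] at h2
        · rw [List.all_eq_true] at h2
          have h3 := h2 c ((mem_getD_tupOf R b c).2 hbc)
          rw [PySem.Set.contains_iff, mem_getD_tupOf] at h3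
          exact h3
        · simp only [Bool.and_eq_true, PySem.Dict.contains_iff_mem_keys, mem_keys_tupOf,
            Bool.not_eq_eq_eq_not, Bool.not_true, beq_eq_false_iff_ne, ne_eq]
          exact ⟨⟨c, hbc⟩, hab'⟩
    · intro h a _
      simp only [Function.comp]
      rw [List.all_eq_true]
      intro b hb
      split_ifs with hcond
      · rw [List.all_eq_true]
        intro c hc
        rw [PySem.Set.contains_iff, mem_getD_tupOf]
        rw [mem_getD_tupOf] at hb hc
        exact h a b c hb hc
      · rfl

-- ===== VERDICT (by name: the statement is the Claim_ definition above) =====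
theorem is_transitive_spec : Claim_equal_is_transitive := by
  intro R _
  unfold Spec_is_transitive
  rw [Bool.eq_iff_iff, a_iff, alt_iff]
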